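-- pv_equiv track=rewrite | github.com/scieloorg/PC-Programs | src/scielo/bin/xml/modules/xml_utils.py | complete_entity
-- ===== SOURCE A (Python) =====
-- def complete_entity(xml_content):
--     result = []
--     for item in xml_content.replace('&#', '~BREAK~&#').split('~BREAK~'):
--         if item.startswith('&#'):
--             words = item.split(' ')
--             if len(words) > 0:
--                 ent = words[0][2:]
--                 if ent.isdigit():
--                     words[0] += ';'
--             item = ' '.join(words)
--         result.append(item)
--     return ''.join(result)
-- ===== SOURCE B (Python) =====
-- def complete_entity(xml_content):
--     out = []
--     n = len(xml_content)
--     i = 0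
--     while True:
--         j = xml_content.find('&#', i)
--         if j == -1:
--             out.append(xml_content[i:])
--             return ''.join(out)
--         k = j + 2
--         end = n
--         sp = xml_content.find(' ', k)
--         if sp != -1:
--             end = sp
--         amp = xml_content.find('&#', k)
--         if amp != -1 and amp < end:
--             end = amp
--         chunk = xml_content[k:end]
--         semi = ';' if chunk.isdigit() else ''
--         out.append(xml_content[i:j] + '&#' + chunk + semi)
--         i = end
-- ===== Notes on version B (the rewrite author's own statement) =====
-- stated objective: alternative
-- what changed: B replaces A's replace-with-'~BREAK~'-marker / split / per-item-split-and-rejoin pipeline by a single index-based scan that finds each '&#', cuts the chunk at the first space or next '&#', and appends ';' when the chunk is all digits.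
-- intended difference: On inputs containing '~BREAK~', or '~BREAK' immediately followed by '&#', A's internal marker collides with the text and A silently deletes or reorders those characters (e.g. 'a~BREAK~b' -> 'ab', '~BREAK&#1' -> 'BREAK~&#1'), while B leaves the text intact and only appends semicolons, which is the intended behaviour. — e.g. on complete_entity("a~BREAK~b"): A returns "ab", B returns "a~BREAK~b"
import Mathlib
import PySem

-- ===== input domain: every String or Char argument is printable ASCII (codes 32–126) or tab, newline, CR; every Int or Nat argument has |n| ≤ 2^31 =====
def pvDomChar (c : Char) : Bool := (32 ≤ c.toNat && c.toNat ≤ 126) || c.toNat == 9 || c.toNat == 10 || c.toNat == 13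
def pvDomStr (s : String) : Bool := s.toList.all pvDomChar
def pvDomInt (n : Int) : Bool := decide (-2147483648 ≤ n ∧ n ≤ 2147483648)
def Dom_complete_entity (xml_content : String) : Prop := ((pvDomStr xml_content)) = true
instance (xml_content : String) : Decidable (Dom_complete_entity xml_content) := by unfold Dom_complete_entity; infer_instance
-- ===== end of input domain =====

-- B replaces A's '~BREAK~'-marker replace/split/rejoin pipeline by one index-based scan
-- (find each '&#', cut the chunk at the first space or next '&#', append ';' to digit
-- chunks); on inputs where A's marker collides with the text (D_ below) A drops or
-- reorders characters and B intentionally keeps the text intact.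


-- ===== PORT A =====
-- body of A's loop: if item.startswith('&#'): words = item.split(' '); if len(words) > 0: …
def pvAItem (item : List Char) : List Char :=
  if PySem.Chars.startswith item ['&', '#'] then
    let words := PySem.Chars.splitOn item [' ']
    let words2 :=
      if words.length > 0 then
        match words with
        | [] => []
        | w :: ws =>
            (if PySem.Chars.strIsdigit (PySem.Chars.slice w (some 2) none) then w ++ [';'] else w) :: ws
      else words
    PySem.Chars.join [' '] words2
  else item

def complete_entity (xml_content : String) : String :=
  let items := PySem.Chars.splitOn
      (PySem.Chars.replace xml_content.toList ['&', '#'] "~BREAK~&#".toList)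
      "~BREAK~".toList
  String.ofList (PySem.Chars.join [] (items.foldl (fun result item => result ++ [pvAItem item]) []))

-- ===== PORT B =====
-- Source B's while loop; i is the scan index; fuel only makes the recursion structural
-- (i grows by at least 2 whenever '&#' is found, so fuel = length + 1 is never exhausted).
def pvBGo (s : List Char) : Nat → Int → List (List Char) → List (List Char)
  | 0, _i, out => out
  | fuel + 1, i, out =>
    let j := PySem.Chars.findFrom s ['&', '#'] i none
    if j = -1 then out ++ [PySem.Chars.slice s (some i) none]
    else
      let k := j + 2
      let sp := PySem.Chars.findFrom s [' '] k none
      let end1 := if sp ≠ -1 then sp else (s.length : Int)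
      let amp := PySem.Chars.findFrom s ['&', '#'] k none
      let end2 := if amp ≠ -1 ∧ amp < end1 then amp else end1
      let chunk := PySem.Chars.slice s (some k) (some end2)
      let semi := if PySem.Chars.strIsdigit chunk then [';'] else []
      pvBGo s fuel end2 (out ++ [PySem.Chars.slice s (some i) (some j) ++ ['&', '#'] ++ chunk ++ semi])

def complete_entity_alt (xml_content : String) : String :=
  String.ofList (PySem.Chars.join [] (pvBGo xml_content.toList (xml_content.toList.length + 1) 0 []))

-- ===== PRECONDITION & SPEC =====
-- On inputs containing '~BREAK~', or '~BREAK' immediately followed by '&#', A's internal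
-- marker collides with the text and A silently deletes or reorders those characters
-- (e.g. 'a~BREAK~b' -> 'ab'), while B leaves the text intact and only appends semicolons,
-- which is the intended behaviour.
def D_complete_entity (xml_content : String) : Prop :=
  PySem.Str.isIn "~BREAK~" xml_content = true ∨ PySem.Str.isIn "~BREAK&#" xml_content = true
instance (xml_content : String) : Decidable (D_complete_entity xml_content) := by
  unfold D_complete_entity; infer_instance

def Spec_complete_entity (xml_content : String) (out : String) : Prop :=
  ¬ D_complete_entity xml_content → out = complete_entity_alt xml_content
instance (xml_content : String) (out : String) : Decidable (Spec_complete_entity xml_content out) := by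
  unfold Spec_complete_entity; infer_instance

def pvDiffWitness_complete_entity : String := "a~BREAK~b"
def pvDiffWitnessOut_complete_entity : String × String := ("ab", "a~BREAK~b")

-- ===== CLAIM (what is proved, stated in full; the proofs are below) =====
def Claim_unchanged_complete_entity : Prop := ∀ (xml_content : String), Dom_complete_entity xml_content → Spec_complete_entity xml_content (complete_entity xml_content)
def Claim_changed_complete_entity : Prop := Dom_complete_entity (pvDiffWitness_complete_entity) ∧ D_complete_entity (pvDiffWitness_complete_entity) ∧ complete_entity (pvDiffWitness_complete_entity) = pvDiffWitnessOut_complete_entity.1 ∧ complete_entity_alt (pvDiffWitness_complete_entity) = pvDiffWitnessOut_complete_entity.2 ∧ pvDiffWitnessOut_complete_entity.1 ≠ pvDiffWitnessOut_complete_entity.2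

-- ===== LEMMAS AND PROOFS =====

lemma pvRepGo (old new : List Char) (hold : old ≠ []) :
    ∀ (l : List Char) (fuel : Nat) (acc : List Char), l.length ≤ fuel →
      PySem.Chars.replace.go old new fuel l acc = acc.reverse ++ PySem.Chars.replace l old new := by
  have hrep : ∀ l : List Char, PySem.Chars.replace l old new =
      PySem.Chars.replace.go old new l.length l [] := by
    intro l
    simp [PySem.Chars.replace, List.isEmpty_eq_false_iff.mpr hold]
  suffices h : ∀ (n : Nat) (l : List Char), l.length ≤ n → ∀ (fuel : Nat) (acc : List Char), l.length ≤ fuel →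
      PySem.Chars.replace.go old new fuel l acc = acc.reverse ++ PySem.Chars.replace l old new by
    intro l fuel acc hl
    exact h l.length l (le_refl _) fuel acc hl
  intro n
  induction n with
  | zero =>
    intro l hn fuel acc hl
    have : l = [] := List.eq_nil_of_length_eq_zero (Nat.le_zero.mp hn)
    subst this
    cases fuel <;> simp [PySem.Chars.replace.go, hrep]
  | succ n ih =>
    intro l hn fuel acc hl
    cases l with
    | nil => cases fuel <;> simp [PySem.Chars.replace.go, hrep]
    | cons c t =>
      have h1 : 1 ≤ old.length := List.length_pos_of_ne_nil hold
      have hdl : (List.drop old.length (c::t)).length = t.length + 1 - old.length := by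
        simp
      simp only [List.length_cons] at hn hl
      cases fuel with
      | zero => omega
      | succ fuel =>
        rw [hrep]
        simp only [List.length_cons]
        rw [show PySem.Chars.replace.go old new (fuel+1) (c::t) acc =
              if old.isPrefixOf (c::t) then
                PySem.Chars.replace.go old new fuel (List.drop old.length (c::t)) (new.reverse ++ acc)
              else PySem.Chars.replace.go old new fuel t (c :: acc) from rfl]
        rw [show PySem.Chars.replace.go old new (t.length+1) (c::t) [] =
              if old.isPrefixOf (c::t) then
                PySem.Chars.replace.go old new t.length (List.drop old.length (c::t)) (new.reverse ++ [])
              else PySem.Chars.replace.go old new t.length t (c :: []) from rfl]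
        have hd1 : (List.drop old.length (c::t)).length ≤ n := by rw [hdl]; omega
        have ht1 : t.length ≤ n := by omega
        split
        · rw [ih _ hd1 fuel _ (by rw [hdl]; omega),
              ih _ hd1 t.length _ (by rw [hdl]; omega)]
          simp
        · rw [ih _ ht1 fuel _ (by omega), ih _ ht1 t.length _ (le_refl _)]
          simp

lemma pvRepNil (old new : List Char) (hold : old ≠ []) :
    PySem.Chars.replace [] old new = [] := by
  simp [PySem.Chars.replace, List.isEmpty_eq_false_iff.mpr hold, PySem.Chars.replace.go]

lemma pvRepPos (old new : List Char) (hold : old ≠ []) (c : Char) (t : List Char)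
    (h : old <+: (c :: t)) :
    PySem.Chars.replace (c :: t) old new = new ++ PySem.Chars.replace (List.drop old.length (c :: t)) old new := by
  have hrep : PySem.Chars.replace (c::t) old new =
      PySem.Chars.replace.go old new (t.length+1) (c::t) [] := by
    simp [PySem.Chars.replace, List.isEmpty_eq_false_iff.mpr hold]
  rw [hrep]
  rw [show PySem.Chars.replace.go old new (t.length+1) (c::t) [] =
        if old.isPrefixOf (c::t) then
          PySem.Chars.replace.go old new t.length (List.drop old.length (c::t)) (new.reverse ++ [])
        else PySem.Chars.replace.go old new t.length t (c :: []) from rfl]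
  rw [if_pos (List.isPrefixOf_iff_prefix.mpr h)]
  rw [pvRepGo old new hold _ _ _ (by simp only [List.length_drop, List.length_cons]
                                     have := List.length_pos_of_ne_nil hold; omega)]
  simp

lemma pvRepNeg (old new : List Char) (hold : old ≠ []) (c : Char) (t : List Char)
    (h : ¬ old <+: (c :: t)) :
    PySem.Chars.replace (c :: t) old new = c :: PySem.Chars.replace t old new := by
  have hrep : PySem.Chars.replace (c::t) old new =
      PySem.Chars.replace.go old new (t.length+1) (c::t) [] := by
    simp [PySem.Chars.replace, List.isEmpty_eq_false_iff.mpr hold]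
  rw [hrep]
  rw [show PySem.Chars.replace.go old new (t.length+1) (c::t) [] =
        if old.isPrefixOf (c::t) then
          PySem.Chars.replace.go old new t.length (List.drop old.length (c::t)) (new.reverse ++ [])
        else PySem.Chars.replace.go old new t.length t (c :: []) from rfl]
  rw [if_neg (by rw [List.isPrefixOf_iff_prefix]; exact h)]
  rw [pvRepGo old new hold _ _ _ (le_refl _)]
  simp

lemma pvSplGo (sep : List Char) (hsep : sep ≠ []) :
    ∀ (l : List Char) (fuel : Nat) (cur : List Char) (acc : List (List Char)), l.length < fuel →
      PySem.Chars.splitOn.go sep fuel l cur acc =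
        acc.reverse ++ List.modifyHead (fun x => cur.reverse ++ x) (PySem.Chars.splitOn l sep) := by
  have hs : ∀ l : List Char, PySem.Chars.splitOn l sep =
      PySem.Chars.splitOn.go sep (l.length + 1) l [] [] := fun _ => rfl
  suffices h : ∀ (n : Nat) (l : List Char), l.length ≤ n → ∀ (fuel : Nat) (cur : List Char)
      (acc : List (List Char)), l.length < fuel →
      PySem.Chars.splitOn.go sep fuel l cur acc =
        acc.reverse ++ List.modifyHead (fun x => cur.reverse ++ x) (PySem.Chars.splitOn l sep) by
    intro l fuel cur acc hl
    exact h l.length l (le_refl _) fuel cur acc hl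
  intro n
  induction n with
  | zero =>
    intro l hn fuel cur acc hl
    have : l = [] := List.eq_nil_of_length_eq_zero (Nat.le_zero.mp hn)
    subst this
    cases fuel with
    | zero => omega
    | succ fuel => simp [PySem.Chars.splitOn.go, PySem.Chars.splitOn]
  | succ n ih =>
    intro l hn fuel cur acc hl
    cases l with
    | nil =>
      cases fuel with
      | zero => omega
      | succ fuel => simp [PySem.Chars.splitOn.go, PySem.Chars.splitOn]
    | cons c t =>
      have h1 : 1 ≤ sep.length := List.length_pos_of_ne_nil hsep
      have hdl : (List.drop sep.length (c::t)).length = t.length + 1 - sep.length := by simp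
      simp only [List.length_cons] at hn hl
      cases fuel with
      | zero => omega
      | succ fuel =>
        rw [hs]
        simp only [List.length_cons]
        rw [show PySem.Chars.splitOn.go sep (fuel+1) (c::t) cur acc =
              if sep.isPrefixOf (c::t) then
                PySem.Chars.splitOn.go sep fuel (List.drop sep.length (c::t)) [] (cur.reverse :: acc)
              else PySem.Chars.splitOn.go sep fuel t (c :: cur) acc from rfl]
        rw [show PySem.Chars.splitOn.go sep (t.length+1+1) (c::t) [] [] =
              if sep.isPrefixOf (c::t) then
                PySem.Chars.splitOn.go sep (t.length+1) (List.drop sep.length (c::t)) [] ([].reverse :: [])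
              else PySem.Chars.splitOn.go sep (t.length+1) t (c :: []) [] from rfl]
        have hd1 : (List.drop sep.length (c::t)).length ≤ n := by rw [hdl]; omega
        have ht1 : t.length ≤ n := by omega
        split
        · rw [ih _ hd1 fuel _ _ (by rw [hdl]; omega),
              ih _ hd1 (t.length+1) _ _ (by rw [hdl]; omega)]
          cases h : PySem.Chars.splitOn (List.drop sep.length (c::t)) sep <;> simp
        · rw [ih _ ht1 fuel _ _ (by omega), ih _ ht1 (t.length+1) _ _ (by omega)]
          cases h : PySem.Chars.splitOn t sep <;> simp

lemma pvSplitNil (sep : List Char) : PySem.Chars.splitOn [] sep = [[]] := rfl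

lemma pvSplitPos (sep : List Char) (hsep : sep ≠ []) (c : Char) (t : List Char) (h : sep <+: (c :: t)) :
    PySem.Chars.splitOn (c :: t) sep = [] :: PySem.Chars.splitOn (List.drop sep.length (c :: t)) sep := by
  have h1 : 1 ≤ sep.length := List.length_pos_of_ne_nil hsep
  have hdl : (List.drop sep.length (c::t)).length = t.length + 1 - sep.length := by simp
  rw [show PySem.Chars.splitOn (c::t) sep = PySem.Chars.splitOn.go sep (t.length+1+1) (c::t) [] [] from rfl]
  rw [show PySem.Chars.splitOn.go sep (t.length+1+1) (c::t) [] [] =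
        if sep.isPrefixOf (c::t) then
          PySem.Chars.splitOn.go sep (t.length+1) (List.drop sep.length (c::t)) [] ([].reverse :: [])
        else PySem.Chars.splitOn.go sep (t.length+1) t (c :: []) [] from rfl]
  rw [if_pos (List.isPrefixOf_iff_prefix.mpr h)]
  rw [pvSplGo sep hsep _ _ _ _ (by rw [hdl]; omega)]
  cases h2 : PySem.Chars.splitOn (List.drop sep.length (c::t)) sep <;> simp

lemma pvSplitNeg (sep : List Char) (c : Char) (t : List Char) (h : ¬ sep <+: (c :: t)) :
    PySem.Chars.splitOn (c :: t) sep = List.modifyHead (fun x => c :: x) (PySem.Chars.splitOn t sep) := by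
  rw [show PySem.Chars.splitOn (c::t) sep = PySem.Chars.splitOn.go sep (t.length+1+1) (c::t) [] [] from rfl]
  rw [show PySem.Chars.splitOn.go sep (t.length+1+1) (c::t) [] [] =
        if sep.isPrefixOf (c::t) then
          PySem.Chars.splitOn.go sep (t.length+1) (List.drop sep.length (c::t)) [] ([].reverse :: [])
        else PySem.Chars.splitOn.go sep (t.length+1) t (c :: []) [] from rfl]
  rw [if_neg (by rw [List.isPrefixOf_iff_prefix]; exact h)]
  rw [pvSplGo sep (by rintro rfl; simp at h) _ _ _ _ (by omega)]
  cases h2 : PySem.Chars.splitOn t sep <;> simp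

lemma pvSplitNeNil (sep : List Char) (hsep : sep ≠ []) : ∀ (l : List Char), PySem.Chars.splitOn l sep ≠ [] := by
  suffices h : ∀ (n : Nat) (l : List Char), l.length ≤ n → PySem.Chars.splitOn l sep ≠ [] by
    intro l; exact h l.length l (le_refl _)
  intro n
  induction n with
  | zero =>
    intro l hn
    have : l = [] := List.eq_nil_of_length_eq_zero (Nat.le_zero.mp hn)
    subst this; simp [pvSplitNil]
  | succ n ih =>
    intro l hn
    cases l with
    | nil => simp [pvSplitNil]
    | cons c t =>
      simp only [List.length_cons] at hn
      by_cases h : sep <+: (c :: t)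
      · rw [pvSplitPos sep hsep c t h]; simp
      · rw [pvSplitNeg sep c t h]
        cases h2 : PySem.Chars.splitOn t sep with
        | nil => exact absurd h2 (ih t (by omega))
        | cons w ws => simp

lemma pvSplitSkip (sep : List Char) :
    ∀ (a r : List Char), (∀ i, i < a.length → ¬ sep <+: List.drop i (a ++ r)) →
      PySem.Chars.splitOn (a ++ r) sep =
        List.modifyHead (fun x => a ++ x) (PySem.Chars.splitOn r sep) := by
  intro a
  induction a with
  | nil =>
    intro r _
    simp only [List.nil_append]
    cases h : PySem.Chars.splitOn r sep <;> simp
  | cons c a' ih =>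
    intro r hno
    have h0 : ¬ sep <+: (c :: (a' ++ r)) := by
      have := hno 0 (by simp)
      simpa using this
    rw [List.cons_append, pvSplitNeg sep c (a' ++ r) h0]
    rw [ih r (by
      intro i hi
      have := hno (i+1) (by simp; omega)
      simpa using this)]
    cases h2 : PySem.Chars.splitOn r sep <;> simp

lemma pvSplitSep (sep : List Char) (hsep : sep ≠ []) (r : List Char) :
    PySem.Chars.splitOn (sep ++ r) sep = [] :: PySem.Chars.splitOn r sep := by
  cases sep with
  | nil => exact absurd rfl hsep
  | cons d ds =>
    rw [List.cons_append, pvSplitPos (d::ds) hsep d (ds ++ r) (by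
      rw [show d :: (ds ++ r) = (d :: ds) ++ r from rfl]; exact List.prefix_append _ _)]
    congr 1
    rw [show d :: (ds ++ r) = (d :: ds) ++ r from rfl]
    simp

lemma pvSplitNone (sep : List Char) (l : List Char)
    (h : ∀ i, ¬ sep <+: List.drop i l) :
    PySem.Chars.splitOn l sep = [l] := by
  have := pvSplitSkip sep l [] (by intro i hi; simpa using h i)
  simpa [pvSplitNil] using this

lemma pvJoinNilFlat : ∀ (ps : List (List Char)), PySem.Chars.join [] ps = ps.flatten := by
  intro ps
  induction ps with
  | nil => simp [PySem.Chars.join_nil]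
  | cons p rest ih =>
    cases rest with
    | nil => simp [PySem.Chars.join_singleton]
    | cons q rest' =>
      rw [PySem.Chars.join_cons_cons]
      simp only [List.flatten_cons] at ih ⊢
      rw [ih]
      simp

lemma pvJoinSplitSpace : ∀ (l : List Char),
    PySem.Chars.join [' '] (PySem.Chars.splitOn l [' ']) = l := by
  suffices h : ∀ (n : Nat) (l : List Char), l.length ≤ n →
      PySem.Chars.join [' '] (PySem.Chars.splitOn l [' ']) = l by
    intro l; exact h l.length l (le_refl _)
  intro n
  induction n with
  | zero =>
    intro l hn
    have : l = [] := List.eq_nil_of_length_eq_zero (Nat.le_zero.mp hn)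
    subst this; simp [pvSplitNil, PySem.Chars.join_singleton]
  | succ n ih =>
    intro l hn
    cases l with
    | nil => simp [pvSplitNil, PySem.Chars.join_singleton]
    | cons c t =>
      simp only [List.length_cons] at hn
      by_cases hc : c = ' '
      · subst hc
        rw [pvSplitPos [' '] (by simp) ' ' t (by simp)]
        simp only [show ([' '] : List Char).length = 1 from rfl, List.drop_succ_cons, List.drop_zero]
        cases h2 : PySem.Chars.splitOn t [' '] with
        | nil => exact absurd h2 (pvSplitNeNil [' '] (by simp) t)
        | cons w ws =>
          rw [PySem.Chars.join_cons_cons]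
          have := ih t (by omega)
          rw [h2] at this
          rw [this]
          simp
      · rw [pvSplitNeg [' '] c t (by
          intro hp
          rcases List.cons_prefix_cons.mp hp with ⟨h1, _⟩
          exact hc h1.symm)]
        cases h2 : PySem.Chars.splitOn t [' '] with
        | nil => exact absurd h2 (pvSplitNeNil [' '] (by simp) t)
        | cons w ws =>
          have := ih t (by omega)
          rw [h2] at this
          cases ws with
          | nil =>
            simp only [List.modifyHead]
            rw [PySem.Chars.join_singleton] at this ⊢
            simp [this]
          | cons w2 ws' =>
            simp only [List.modifyHead]
            rw [PySem.Chars.join_cons_cons] at this ⊢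
            simp [← this]

def pvM : List Char := ['~','B','R','E','A','K','~']
def pvMB : List Char := ['~','B','R','E','A','K']
def pvMA : List Char := ['~','B','R','E','A','K','&','#']
def pvAMPl : List Char := ['&','#']

lemma pvInfixOfPrefixDrop {sub l : List Char} {i : Nat} (h : sub <+: l.drop i) : sub <:+: l :=
  h.isInfix.trans (List.drop_suffix i l).isInfix

lemma pvFindEqOf (l sub : List Char) (n : Nat) (h1 : sub <+: l.drop n)
    (h2 : ∀ i, i < n → ¬ sub <+: l.drop i) : PySem.Chars.find l sub = n := by
  have hinf : sub <:+: l := pvInfixOfPrefixDrop h1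
  have hne : PySem.Chars.find l sub ≠ -1 := (PySem.Chars.find_ne_neg_one_iff l sub).mpr hinf
  have h0 : 0 ≤ PySem.Chars.find l sub := by
    have := PySem.Chars.neg_one_le_find l sub
    omega
  obtain ⟨hp, hmin⟩ := PySem.Chars.find_spec h0
  have heq : (PySem.Chars.find l sub).toNat = n := by
    rcases Nat.lt_trichotomy (PySem.Chars.find l sub).toNat n with h | h | h
    · exact absurd hp (h2 _ h)
    · exact h
    · exact absurd h1 (hmin n h)
  omega

lemma pvSP (c : Char) (l : List Char) (i : Nat) : ([c] <+: l.drop i) ↔ l[i]? = some c := by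
  constructor
  · intro h
    obtain ⟨t, ht⟩ := h
    have : (l.drop i).head? = some c := by rw [← ht]; rfl
    rwa [List.head?_drop] at this
  · intro h
    have hd : (l.drop i).head? = some c := by rwa [List.head?_drop]
    cases hdrop : l.drop i with
    | nil => rw [hdrop] at hd; simp at hd
    | cons d t =>
      rw [hdrop] at hd
      simp at hd
      subst hd
      exact ⟨t, rfl⟩

lemma pvNotMemTakeOfGet (c : Char) (l : List Char) (n : Nat)
    (h : ∀ i, i < n → l[i]? ≠ some c) : c ∉ l.take n := by
  intro hmem
  obtain ⟨i, hi, hgi⟩ := List.getElem_of_mem hmem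
  have hilt : i < n := by
    have := List.length_take_le n l
    simp at hi
    omega
  have : l[i]? = some c := by
    have h1 : (l.take n)[i]? = some c := by
      rw [List.getElem?_eq_getElem hi, hgi]
    rwa [List.getElem?_take_of_lt hilt] at h1
  exact h i hilt this

lemma pvMemIffMem (c : Char) (l : List Char) (hmem : c ∈ l) : ∃ i : Nat, l[i]? = some c := by
  obtain ⟨i, hi, hgi⟩ := List.getElem_of_mem hmem
  refine ⟨i, ?_⟩
  rw [List.getElem?_eq_getElem hi, hgi]

lemma pvNoMBefore (x r : List Char) (hM : ¬ pvM <:+: x) (hMB : ¬ pvMB <:+ x) :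
    ∀ i, i < x.length → ¬ pvM <+: List.drop i (x ++ (pvM ++ r)) := by
  intro i hi hpre
  rw [List.drop_append_of_le_length (le_of_lt hi)] at hpre
  have hlen : (x.drop i).length = x.length - i := by simp
  set k := x.length - i with hk
  have hk1 : 1 ≤ k := by omega
  by_cases h7 : 7 ≤ k
  · have : pvM <+: x.drop i :=
      (List.isPrefix_append_of_length (by rw [hlen]; simp [pvM]; omega)).mp hpre
    exact hM (pvInfixOfPrefixDrop this)
  · have hk6 : k ≤ 6 := by omega
    obtain ⟨t, ht⟩ := hpre
    have hxi : x.drop i ++ (pvM ++ r).take (7 - k) = pvM := by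
      have h1 : List.take 7 (pvM ++ t) = List.take 7 (List.drop i x ++ (pvM ++ r)) :=
        congrArg _ ht
      have h2 : List.take 7 (pvM ++ t) = pvM := by
        rw [List.take_append]; simp [pvM]
      have h3 : List.take 7 (List.drop i x ++ (pvM ++ r)) =
          List.drop i x ++ List.take (7 - k) (pvM ++ r) := by
        rw [List.take_append, List.take_of_length_le (by rw [hlen]; omega), hlen]
      rw [← h3, ← h1, h2]
    have hxiM : x.drop i = pvM.take k := by
      have hpx : x.drop i <+: pvM := ⟨(pvM ++ r).take (7 - k), hxi⟩
      rw [List.prefix_iff_eq_take] at hpx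
      rw [hpx, hlen]
    have htake : (pvM ++ r).take (7 - k) = pvM.take (7 - k) :=
      List.take_append_of_le_length (by simp [pvM])
    have hdk : pvM.take k ++ pvM.take (7 - k) = pvM := by
      rw [← hxiM, ← htake]; exact hxi
    -- k must be 6
    interval_cases k
    · exact absurd hdk (by decide)
    · exact absurd hdk (by decide)
    · exact absurd hdk (by decide)
    · exact absurd hdk (by decide)
    · exact absurd hdk (by decide)
    · -- k = 6 : x ends with pvMB
      apply hMB
      have : x.drop i = pvMB := by rw [hxiM]; decide
      rw [← this]
      exact List.drop_suffix i x

lemma pvFindDropNeg (l sub : List Char) (m : Nat) (h : PySem.Chars.find l sub = -1) :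
    PySem.Chars.find (l.drop m) sub = -1 := by
  rw [PySem.Chars.find_eq_neg_one_iff] at h ⊢
  intro hinf
  exact h (hinf.trans (List.drop_suffix m l).isInfix)

lemma pvFindSpecNat (l sub : List Char) (g : Nat) (hg : PySem.Chars.find l sub = (g : Int)) :
    sub <+: l.drop g ∧ ∀ i, i < g → ¬ sub <+: l.drop i := by
  have h0 : 0 ≤ PySem.Chars.find l sub := by rw [hg]; exact Int.natCast_nonneg g
  obtain ⟨hp, hmin⟩ := PySem.Chars.find_spec h0
  rw [hg, Int.toNat_natCast] at hp hmin
  exact ⟨hp, hmin⟩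

lemma pvFindDropPos (l sub : List Char) (m g : Nat) (hg : PySem.Chars.find l sub = (g : Int))
    (hm : m ≤ g) : PySem.Chars.find (l.drop m) sub = ((g - m : Nat) : Int) := by
  obtain ⟨hp, hmin⟩ := pvFindSpecNat l sub g hg
  apply pvFindEqOf
  · rw [List.drop_drop, show m + (g - m) = g by omega]
    exact hp
  · intro i hi
    rw [List.drop_drop]
    exact hmin (m + i) (by omega)

lemma pvSingletonInfixIff (c : Char) (l : List Char) : [c] <:+: l ↔ c ∈ l := by
  constructor
  · rintro ⟨s, t, rfl⟩; simp
  · intro h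
    obtain ⟨i, hi⟩ := pvMemIffMem c l h
    exact pvInfixOfPrefixDrop ((pvSP c l i).mpr hi)

lemma pvFindMinGet (v : List Char) (c : Char) (p : Nat)
    (hfind : PySem.Chars.find v [c] = (p : Int)) :
    ∀ i, i < p → v[i]? ≠ some c := by
  intro i hi hc
  exact (pvFindSpecNat v [c] p hfind).2 i hi ((pvSP c v i).mpr hc)

lemma pvFindAtGet (v : List Char) (c : Char) (p : Nat)
    (hfind : PySem.Chars.find v [c] = (p : Int)) : v[p]? = some c :=
  (pvSP c v p).mp (pvFindSpecNat v [c] p hfind).1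

lemma pvFindTake (v : List Char) (c : Char) (p g : Nat)
    (hfind : PySem.Chars.find v [c] = (p : Int)) (hpg : p < g) :
    PySem.Chars.find (v.take g) [c] = (p : Int) := by
  apply pvFindEqOf
  · rw [pvSP]
    rw [List.getElem?_take_of_lt hpg]
    exact pvFindAtGet v c p hfind
  · intro i hi
    rw [pvSP, List.getElem?_take_of_lt (by omega)]
    exact pvFindMinGet v c p hfind i hi

lemma pvNotMemTakeFind (v : List Char) (c : Char) (p g : Nat)
    (hfind : PySem.Chars.find v [c] = (p : Int)) (hgp : g ≤ p) : c ∉ v.take g := by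
  apply pvNotMemTakeOfGet
  intro i hi
  exact pvFindMinGet v c p hfind i (by omega)

lemma pvDropEqConsDrop (v : List Char) (c : Char) (p : Nat) (h : v[p]? = some c) :
    v.drop p = c :: v.drop (p + 1) := by
  have hlt : p < v.length := by
    by_contra hc
    rw [List.getElem?_eq_none_iff.mpr (by omega)] at h
    simp at h
  rw [List.drop_eq_getElem_cons hlt]
  have : v[p] = c := by
    have := List.getElem?_eq_getElem hlt
    rw [h] at this
    simpa using this.symm
  rw [this]

-- pvAItem on an item that does not start with '&#'
lemma pvAItemId (item : List Char) (h : ¬ ['&','#'] <+: item) : pvAItem item = item := by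
  unfold pvAItem
  rw [if_neg (by rw [PySem.Chars.startswith_iff]; exact h)]

-- pvAItem on '&#' ++ w with no space in w
lemma pvItemNoSpace (w : List Char) (hsp : ' ' ∉ w) :
    pvAItem (['&','#'] ++ w) =
      ['&','#'] ++ w ++ (if PySem.Chars.strIsdigit w then [';'] else []) := by
  unfold pvAItem
  rw [if_pos (by rw [PySem.Chars.startswith_iff]; exact List.prefix_append _ _)]
  have hsplit : PySem.Chars.splitOn (['&','#'] ++ w) [' '] = [['&','#'] ++ w] := by
    apply pvSplitNone
    intro i hpre
    obtain ⟨t, ht⟩ := hpre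
    have : ' ' ∈ ['&','#'] ++ w := by
      have : ' ' ∈ List.drop i (['&','#'] ++ w) := by rw [← ht]; simp
      exact List.mem_of_mem_drop this
    simp at this
    exact hsp this
  simp only [hsplit]
  have hslice : PySem.Chars.slice (['&','#'] ++ w) (some 2) none = w := by
    simp [PySem.Chars.slice_eq_listSlice, PySem.List.slice_from]
  simp only [List.length_cons, hslice]
  by_cases hd : PySem.Chars.strIsdigit w = true <;>
    simp [hd, PySem.Chars.join_singleton]

-- pvAItem on '&#' ++ w with first space of w at p
lemma pvItemSpace (w : List Char) (p : Nat)
    (hfind : PySem.Chars.find w [' '] = (p : Int)) :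
    pvAItem (['&','#'] ++ w) =
      ['&','#'] ++ w.take p ++ (if PySem.Chars.strIsdigit (w.take p) then [';'] else []) ++ w.drop p := by
  have hplen : p < w.length := by
    have := pvFindAtGet w ' ' p hfind
    by_contra h
    rw [List.getElem?_eq_none_iff.mpr (by omega)] at this
    simp at this
  have hwdec : w = w.take p ++ ' ' :: w.drop (p + 1) := by
    rw [← pvDropEqConsDrop w ' ' p (pvFindAtGet w ' ' p hfind)]
    simp
  unfold pvAItem
  rw [if_pos (by rw [PySem.Chars.startswith_iff]; exact List.prefix_append _ _)]
  have hsplit : PySem.Chars.splitOn (['&','#'] ++ w) [' '] =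
      (['&','#'] ++ w.take p) :: PySem.Chars.splitOn (w.drop (p + 1)) [' '] := by
    have hform : ['&','#'] ++ w = (['&','#'] ++ w.take p) ++ ([' '] ++ w.drop (p + 1)) := by
      conv_lhs => rw [hwdec]
      simp
    rw [hform, pvSplitSkip [' '] (['&','#'] ++ w.take p) ([' '] ++ w.drop (p + 1))
        (by
          intro i hi hpre
          rw [pvSP] at hpre
          rw [List.getElem?_append_left hi] at hpre
          match i, hi with
          | 0, _ => simp at hpre
          | 1, _ => simp at hpre
          | (n+2), hi =>
            have hn : n < p := by
              simp only [List.length_append, List.length_cons, List.length_nil,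
                List.length_take] at hi
              omega
            simp only [List.cons_append, List.getElem?_cons_succ, List.nil_append] at hpre
            rw [List.getElem?_take_of_lt hn] at hpre
            exact pvFindMinGet w ' ' p hfind n hn hpre)]
    rw [pvSplitSep [' '] (by simp) (w.drop (p + 1))]
    simp
  simp only [hsplit]
  have hslice : PySem.Chars.slice (['&','#'] ++ w.take p) (some 2) none = w.take p := by
    simp [PySem.Chars.slice_eq_listSlice, PySem.List.slice_from]
  simp only [List.length_cons, hslice]
  have hjoin : ∀ (first : List Char),
      PySem.Chars.join [' '] (first :: PySem.Chars.splitOn (w.drop (p + 1)) [' ']) =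
        first ++ ' ' :: w.drop (p + 1) := by
    intro first
    cases hws : PySem.Chars.splitOn (w.drop (p + 1)) [' '] with
    | nil => exact absurd hws (pvSplitNeNil [' '] (by simp) _)
    | cons w1 ws' =>
      rw [PySem.Chars.join_cons_cons]
      have := pvJoinSplitSpace (w.drop (p + 1))
      rw [hws] at this
      rw [this]
      simp
  have hdropp : ' ' :: w.drop (p + 1) = w.drop p :=
    (pvDropEqConsDrop w ' ' p (pvFindAtGet w ' ' p hfind)).symm
  rw [if_pos (by simp)]
  rw [hjoin, hdropp]
  by_cases hd : PySem.Chars.strIsdigit (w.take p) = true <;> simp [hd]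

lemma pvRepNo (l old new : List Char) (hold : old ≠ []) (h : ¬ old <:+: l) :
    PySem.Chars.replace l old new = l := by
  induction l with
  | nil => exact pvRepNil old new hold
  | cons c t ih =>
    rw [pvRepNeg old new hold c t (fun hp => h hp.isInfix)]
    rw [ih (fun hi => h (hi.trans (List.suffix_cons c t).isInfix))]

lemma pvRepSeg (old new : List Char) (hold : old ≠ []) :
    ∀ (a v : List Char), (∀ i, i < a.length → ¬ old <+: List.drop i (a ++ old ++ v)) →
      PySem.Chars.replace (a ++ old ++ v) old new =
        a ++ new ++ PySem.Chars.replace v old new := by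
  intro a
  induction a with
  | nil =>
    intro v _
    simp only [List.nil_append]
    cases old with
    | nil => exact absurd rfl hold
    | cons d ds =>
      rw [List.cons_append, pvRepPos (d::ds) new hold d (ds ++ v) (by
        rw [show d :: (ds ++ v) = (d :: ds) ++ v from rfl]; exact List.prefix_append _ _)]
      congr 1
      rw [show d :: (ds ++ v) = (d :: ds) ++ v from rfl, List.drop_left]
  | cons c a' ih =>
    intro v hno
    have h0 : ¬ old <+: (c :: (a' ++ old ++ v)) := by
      have := hno 0 (by simp)
      simpa using this
    rw [List.cons_append, List.cons_append, pvRepNeg old new hold c (a' ++ old ++ v) h0]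
    rw [show a' ++ old ++ v = (a' ++ old) ++ v from rfl] at *
    rw [ih v (by
      intro i hi
      have := hno (i+1) (by simp; omega)
      simpa using this)]
    simp

lemma pvMNeNil : pvM ≠ [] := by decide
lemma pvAMPNeNil : (['&','#'] : List Char) ≠ [] := by decide

-- one A-segment: first '&#' of u at jn
lemma pvASeg (u : List Char) (jn : Nat)
    (hfind : PySem.Chars.find u ['&','#'] = (jn : Int))
    (hM : ¬ pvM <:+: u) (hMA : ¬ pvMA <:+: u) :
    PySem.Chars.splitOn (PySem.Chars.replace u ['&','#'] (pvM ++ ['&','#'])) pvM =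
      u.take jn ::
        PySem.Chars.splitOn (['&','#'] ++
          PySem.Chars.replace (u.drop (jn + 2)) ['&','#'] (pvM ++ ['&','#'])) pvM := by
  obtain ⟨hp, hmin⟩ := pvFindSpecNat u ['&','#'] jn hfind
  have hjlen : jn + 2 ≤ u.length := by
    have h1 : 2 ≤ (u.drop jn).length := hp.length_le
    simp at h1
    omega
  have hdec : u = u.take jn ++ ['&','#'] ++ u.drop (jn + 2) := by
    obtain ⟨t, ht⟩ := hp
    have htv : t = u.drop (jn + 2) := by
      have := congrArg (List.drop 2) ht
      rw [List.drop_drop] at this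
      simpa using this
    conv_lhs => rw [← List.take_append_drop jn u, ← ht, htv]
    simp
  have hrep : PySem.Chars.replace u ['&','#'] (pvM ++ ['&','#']) =
      u.take jn ++ (pvM ++ ['&','#']) ++
        PySem.Chars.replace (u.drop (jn + 2)) ['&','#'] (pvM ++ ['&','#']) := by
    conv_lhs => rw [hdec]
    rw [pvRepSeg ['&','#'] (pvM ++ ['&','#']) pvAMPNeNil (u.take jn) (u.drop (jn + 2)) (by
      intro i hi
      rw [← hdec]
      exact hmin i (by simp at hi; omega))]
  rw [hrep]
  have hMa : ¬ pvM <:+: u.take jn := fun h => hM (h.trans (List.take_prefix jn u).isInfix)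
  have hMBa : ¬ pvMB <:+ u.take jn := by
    intro h
    obtain ⟨z, hz⟩ := h
    apply hMA
    have : u = z ++ pvMA ++ (u.drop (jn + 2)) := by
      conv_lhs => rw [hdec, ← hz]
      simp [pvMA, pvMB]
    rw [this]
    exact ⟨z, u.drop (jn+2), by simp⟩
  have hshape : u.take jn ++ (pvM ++ ['&','#']) ++
      PySem.Chars.replace (u.drop (jn + 2)) ['&','#'] (pvM ++ ['&','#']) =
      u.take jn ++ (pvM ++ (['&','#'] ++
        PySem.Chars.replace (u.drop (jn + 2)) ['&','#'] (pvM ++ ['&','#'])))  := by simp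
  rw [hshape]
  rw [pvSplitSkip pvM (u.take jn) _ (by
    intro i hi
    exact pvNoMBefore (u.take jn) _ hMa hMBa i hi)]
  rw [pvSplitSep pvM pvMNeNil]
  simp

-- no '~BREAK~' anywhere in '&#' ++ x when none in x
lemma pvNoMInAmp (x r : List Char) (hM : ¬ pvM <:+: x)
    (hMB : ¬ pvMB <:+ x) :
    ∀ i, i < (['&','#'] ++ x).length → ¬ pvM <+: List.drop i ((['&','#'] ++ x) ++ (pvM ++ r)) := by
  intro i hi hpre
  match i with
  | 0 => simp [pvM, List.cons_prefix_cons] at hpre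
  | 1 => simp [pvM, List.cons_prefix_cons] at hpre
  | (n+2) =>
    have hn : n < x.length := by simpa using hi
    have : pvM <+: List.drop n (x ++ (pvM ++ r)) := by
      simpa using hpre
    exact pvNoMBefore x r hM hMB n hn this

-- segment '&#' ++ v where v has no further '&#'
lemma pvASegAmpNeg (v : List Char)
    (hfind : PySem.Chars.find v ['&','#'] = -1)
    (hM : ¬ pvM <:+: v) :
    PySem.Chars.splitOn (['&','#'] ++
        PySem.Chars.replace v ['&','#'] (pvM ++ ['&','#'])) pvM = [['&','#'] ++ v] := by
  rw [pvRepNo v ['&','#'] _ pvAMPNeNil ((PySem.Chars.find_eq_neg_one_iff v ['&','#']).mp hfind)]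
  apply pvSplitNone
  intro i hpre
  match i with
  | 0 => simp [pvM, List.cons_prefix_cons] at hpre
  | 1 => simp [pvM, List.cons_prefix_cons] at hpre
  | (n+2) =>
    have : pvM <+: List.drop n v := by simpa using hpre
    exact hM (pvInfixOfPrefixDrop this)

-- segment '&#' ++ v where the next '&#' of v is at g
lemma pvASegAmpPos (v : List Char) (g : Nat)
    (hfind : PySem.Chars.find v ['&','#'] = (g : Int))
    (hM : ¬ pvM <:+: v) (hMA : ¬ pvMA <:+: v) :
    PySem.Chars.splitOn (['&','#'] ++
        PySem.Chars.replace v ['&','#'] (pvM ++ ['&','#'])) pvM =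
      (['&','#'] ++ v.take g) ::
        PySem.Chars.splitOn (['&','#'] ++
          PySem.Chars.replace (v.drop (g + 2)) ['&','#'] (pvM ++ ['&','#'])) pvM := by
  obtain ⟨hp, hmin⟩ := pvFindSpecNat v ['&','#'] g hfind
  have hdec : v = v.take g ++ ['&','#'] ++ v.drop (g + 2) := by
    obtain ⟨t, ht⟩ := hp
    have htv : t = v.drop (g + 2) := by
      have := congrArg (List.drop 2) ht
      rw [List.drop_drop] at this
      simpa using this
    conv_lhs => rw [← List.take_append_drop g v, ← ht, htv]
    simp
  have hrep : PySem.Chars.replace v ['&','#'] (pvM ++ ['&','#']) =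
      v.take g ++ (pvM ++ ['&','#']) ++
        PySem.Chars.replace (v.drop (g + 2)) ['&','#'] (pvM ++ ['&','#']) := by
    conv_lhs => rw [hdec]
    rw [pvRepSeg ['&','#'] (pvM ++ ['&','#']) pvAMPNeNil (v.take g) (v.drop (g + 2)) (by
      intro i hi
      rw [← hdec]
      exact hmin i (by simp at hi; omega))]
  rw [hrep]
  have hMb : ¬ pvM <:+: v.take g := fun h => hM (h.trans (List.take_prefix g v).isInfix)
  have hMBb : ¬ pvMB <:+ v.take g := by
    intro h
    obtain ⟨z, hz⟩ := h
    apply hMA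
    have : v = z ++ pvMA ++ (v.drop (g + 2)) := by
      conv_lhs => rw [hdec, ← hz]
      simp [pvMA, pvMB]
    rw [this]
    exact ⟨z, v.drop (g+2), by simp⟩
  have hshape : ['&','#'] ++ (v.take g ++ (pvM ++ ['&','#']) ++
      PySem.Chars.replace (v.drop (g + 2)) ['&','#'] (pvM ++ ['&','#'])) =
      (['&','#'] ++ v.take g) ++ (pvM ++ (['&','#'] ++
        PySem.Chars.replace (v.drop (g + 2)) ['&','#'] (pvM ++ ['&','#'])))  := by simp
  rw [hshape]
  rw [pvSplitSkip pvM (['&','#'] ++ v.take g) _ (by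
    intro i hi
    exact pvNoMInAmp (v.take g) _ hMb hMBb i hi)]
  rw [pvSplitSep pvM pvMNeNil]
  simp

def pvJoinA (t : List Char) : List Char :=
  PySem.Chars.join []
    ((PySem.Chars.splitOn (PySem.Chars.replace t ['&','#'] (pvM ++ ['&','#'])) pvM).map pvAItem)

def pvJoinT (w : List Char) : List Char :=
  PySem.Chars.join []
    ((PySem.Chars.splitOn (['&','#'] ++
        PySem.Chars.replace w ['&','#'] (pvM ++ ['&','#'])) pvM).map pvAItem)

lemma pvFindCases (l sub : List Char) :
    PySem.Chars.find l sub = -1 ∨ ∃ g : Nat, PySem.Chars.find l sub = (g : Int) := by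
  rcases le_or_gt 0 (PySem.Chars.find l sub) with h | h
  · exact Or.inr ⟨(PySem.Chars.find l sub).toNat, (Int.toNat_of_nonneg h).symm⟩
  · left
    have := PySem.Chars.neg_one_le_find l sub
    omega

lemma pvPrefixLen2 (u : List Char) (jn : Nat) (h : ['&','#'] <+: u.drop jn) :
    jn + 2 ≤ u.length := by
  have h1 : 2 ≤ (u.drop jn).length := h.length_le
  by_contra hc
  simp at h1
  omega

lemma pvDropDecomp (v : List Char) (g : Nat) (h : ['&','#'] <+: v.drop g) :
    v.drop g = ['&','#'] ++ v.drop (g + 2) := by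
  obtain ⟨t, ht⟩ := h
  have htv : t = v.drop (g + 2) := by
    have := congrArg (List.drop 2) ht
    rw [List.drop_drop] at this
    simpa using this
  rw [← ht, htv]

lemma pvJoinAEmpty : pvJoinA [] = [] := by
  unfold pvJoinA
  rw [pvRepNil _ _ pvAMPNeNil, pvSplitNil]
  simp only [List.map_cons, List.map_nil]
  rw [pvAItemId [] (by simp), PySem.Chars.join_singleton]

lemma pvJoinMapCons (x : List Char) (L : List (List Char)) :
    PySem.Chars.join [] ((x :: L).map pvAItem) =
      pvAItem x ++ PySem.Chars.join [] (L.map pvAItem) := by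
  rw [pvJoinNilFlat, pvJoinNilFlat]
  simp

lemma pvAItemTake (u : List Char) (jn : Nat)
    (hfind : PySem.Chars.find u ['&','#'] = (jn : Int)) :
    pvAItem (u.take jn) = u.take jn := by
  by_cases hjz : jn = 0
  · subst hjz; simp only [List.take_zero]; exact pvAItemId [] (by simp)
  · apply pvAItemId
    intro hpre
    have : ['&','#'] <+: u := hpre.trans (List.take_prefix jn u)
    exact (pvFindSpecNat u ['&','#'] jn hfind).2 0 (by omega) (by simpa using this)

lemma pvJoinAStep (u : List Char) (jn : Nat)
    (hfind : PySem.Chars.find u ['&','#'] = (jn : Int))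
    (hM : ¬ pvM <:+: u) (hMA : ¬ pvMA <:+: u) :
    pvJoinA u = u.take jn ++ pvJoinT (u.drop (jn + 2)) := by
  unfold pvJoinA pvJoinT
  rw [pvASeg u jn hfind hM hMA, pvJoinMapCons, pvAItemTake u jn hfind]

lemma pvJoinANoAmp (t : List Char)
    (hfind : PySem.Chars.find t ['&','#'] = -1) (hM : ¬ pvM <:+: t) :
    pvJoinA t = t := by
  unfold pvJoinA
  rw [pvRepNo t ['&','#'] _ pvAMPNeNil ((PySem.Chars.find_eq_neg_one_iff t ['&','#']).mp hfind)]
  rw [pvSplitNone pvM t (fun i h => hM (pvInfixOfPrefixDrop h))]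
  simp only [List.map_cons, List.map_nil]
  rw [pvAItemId t (by
    intro hpre
    have : ['&','#'] <:+: t := hpre.isInfix
    exact (PySem.Chars.find_eq_neg_one_iff t ['&','#']).mp hfind this)]
  rw [PySem.Chars.join_singleton]

lemma pvJoinTNeg (v : List Char)
    (hfind : PySem.Chars.find v ['&','#'] = -1) (hM : ¬ pvM <:+: v) :
    pvJoinT v = pvAItem (['&','#'] ++ v) := by
  unfold pvJoinT
  rw [pvASegAmpNeg v hfind hM]
  simp only [List.map_cons, List.map_nil]
  rw [PySem.Chars.join_singleton]

lemma pvJoinTPos (v : List Char) (g : Nat)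
    (hfind : PySem.Chars.find v ['&','#'] = (g : Int))
    (hM : ¬ pvM <:+: v) (hMA : ¬ pvMA <:+: v) :
    pvJoinT v = pvAItem (['&','#'] ++ v.take g) ++ pvJoinT (v.drop (g + 2)) := by
  unfold pvJoinT
  rw [pvASegAmpPos v g hfind hM hMA, pvJoinMapCons]

lemma pvJoinAAmp (w : List Char)
    (hM : ¬ pvM <:+: (['&','#'] ++ w)) (hMA : ¬ pvMA <:+: (['&','#'] ++ w)) :
    pvJoinA (['&','#'] ++ w) = pvJoinT w := by
  have hfind : PySem.Chars.find (['&','#'] ++ w) ['&','#'] = ((0 : Nat) : Int) := by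
    apply pvFindEqOf
    · simpa using List.prefix_append ['&','#'] w
    · intro i hi; omega
  rw [pvJoinAStep _ 0 hfind hM hMA]
  simp

lemma pvJoinOutApp (L : List (List Char)) (p : List Char) :
    PySem.Chars.join [] (L ++ [p]) = PySem.Chars.join [] L ++ p := by
  rw [pvJoinNilFlat, pvJoinNilFlat]
  simp

lemma pvAmpHeadNe (v : List Char) (g p : Nat)
    (hg : PySem.Chars.find v ['&','#'] = (g : Int))
    (hp : PySem.Chars.find v [' '] = (p : Int)) : g ≠ p := by
  intro h
  have h1 : v[p]? = some ' ' := pvFindAtGet v ' ' p hp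
  have h2 : v[g]? = some '&' := by
    have hpre : ['&','#'] <+: v.drop g := (pvFindSpecNat v ['&','#'] g hg).1
    have : ['&'] <+: v.drop g := List.IsPrefix.trans ⟨['#'], rfl⟩ hpre
    exact (pvSP '&' v g).mp this
  rw [h, h1] at h2
  simp at h2

lemma pvMain (s : List Char) :
    ∀ (fuel : Nat) (i : Int) (out : List (List Char)),
      0 ≤ i → i ≤ (s.length : Int) → (s.length : Int) < i + 2 * fuel →
      ¬ pvM <:+: s.drop i.toNat → ¬ pvMA <:+: s.drop i.toNat →
      PySem.Chars.join [] (pvBGo s fuel i out) =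
        PySem.Chars.join [] out ++ pvJoinA (s.drop i.toNat) := by
  intro fuel
  induction fuel with
  | zero => intro i out h0 hin hfuel hM hMA; omega
  | succ fuel ih =>
    intro i out h0 hin hfuel hM hMA
    have hitn : ((i.toNat : Int)) = i := Int.toNat_of_nonneg h0
    have hknle : i.toNat ≤ s.length := by omega
    have hFF : PySem.Chars.findFrom s ['&','#'] i none =
        (if PySem.Chars.find (s.drop i.toNat) ['&','#'] = -1 then -1
         else ↑i.toNat + PySem.Chars.find (s.drop i.toNat) ['&','#']) := by
      rw [← hitn]
      exact PySem.Chars.findFrom_natCast s _ i.toNat hknle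
    rcases pvFindCases (s.drop i.toNat) ['&','#'] with hfind | ⟨jn, hfind⟩
    · -- no '&#' from i on
      have hj : PySem.Chars.findFrom s ['&','#'] i none = -1 := by
        rw [hFF, hfind]; simp
      simp only [pvBGo]
      rw [if_pos hj]
      rw [PySem.Chars.slice_eq_listSlice, PySem.List.slice_from s h0]
      rw [pvJoinOutApp]
      rw [pvJoinANoAmp _ hfind hM]
    · -- '&#' at offset jn of the remaining suffix
      obtain ⟨hpAt, hminAt⟩ := pvFindSpecNat (s.drop i.toNat) ['&','#'] jn hfind
      have hjlen : jn + 2 ≤ (s.drop i.toNat).length := pvPrefixLen2 _ jn hpAt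
      have hulen : (s.drop i.toNat).length = s.length - i.toNat := by simp
      have hknle2 : i.toNat + jn + 2 ≤ s.length := by omega
      have hv : (s.drop i.toNat).drop (jn + 2) = s.drop (i.toNat + jn + 2) := by
        rw [List.drop_drop, show i.toNat + (jn + 2) = i.toNat + jn + 2 by omega]
      have hj : PySem.Chars.findFrom s ['&','#'] i none = ↑i.toNat + ↑jn := by
        rw [hFF, hfind]; rw [if_neg (by omega)]
      have hkcast : (↑i.toNat + ↑jn + 2 : Int) = ((i.toNat + jn + 2 : Nat) : Int) := by
        push_cast; ring
      have hSPF : PySem.Chars.findFrom s [' '] ((i.toNat + jn + 2 : Nat) : Int) none =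
          (if PySem.Chars.find (s.drop (i.toNat + jn + 2)) [' '] = -1 then -1
           else ↑(i.toNat + jn + 2) + PySem.Chars.find (s.drop (i.toNat + jn + 2)) [' ']) :=
        PySem.Chars.findFrom_natCast s _ _ hknle2
      have hAPF : PySem.Chars.findFrom s ['&','#'] ((i.toNat + jn + 2 : Nat) : Int) none =
          (if PySem.Chars.find (s.drop (i.toNat + jn + 2)) ['&','#'] = -1 then -1
           else ↑(i.toNat + jn + 2) + PySem.Chars.find (s.drop (i.toNat + jn + 2)) ['&','#']) :=
        PySem.Chars.findFrom_natCast s _ _ hknle2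
      have headSlice : PySem.Chars.slice s (some i) (some (↑i.toNat + ↑jn)) =
          (s.drop i.toNat).take jn := by
        rw [show (some i) = (some ((i.toNat : Int))) by rw [hitn],
            show (↑i.toNat + ↑jn : Int) = ((i.toNat + jn : Nat) : Int) by push_cast; ring]
        rw [PySem.Chars.slice_eq_listSlice, PySem.List.slice_natCast,
            show i.toNat + jn - i.toNat = jn by omega]
      have hMdrop : ∀ m : Nat, i.toNat ≤ m → ¬ pvM <:+: s.drop m := by
        intro m hm h
        apply hM
        have he : s.drop m = (s.drop i.toNat).drop (m - i.toNat) := by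
          rw [List.drop_drop, show i.toNat + (m - i.toNat) = m by omega]
        rw [he] at h
        exact h.trans (List.drop_suffix _ _).isInfix
      have hMAdrop : ∀ m : Nat, i.toNat ≤ m → ¬ pvMA <:+: s.drop m := by
        intro m hm h
        apply hMA
        have he : s.drop m = (s.drop i.toNat).drop (m - i.toNat) := by
          rw [List.drop_drop, show i.toNat + (m - i.toNat) = m by omega]
        rw [he] at h
        exact h.trans (List.drop_suffix _ _).isInfix
      simp only [pvBGo]
      rw [hj, if_neg (by omega), hkcast]
      rcases pvFindCases (s.drop (i.toNat + jn + 2)) [' '] with hsp | ⟨p, hsp⟩ <;>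
        rcases pvFindCases (s.drop (i.toNat + jn + 2)) ['&','#'] with hgf | ⟨g, hgf⟩
      · -- (a) no space, no further '&#'
        have hspF : PySem.Chars.findFrom s [' '] ((i.toNat + jn + 2 : Nat) : Int) none = -1 := by
          rw [hSPF, hsp]; simp
        have hgfF : PySem.Chars.findFrom s ['&','#'] ((i.toNat + jn + 2 : Nat) : Int) none = -1 := by
          rw [hAPF, hgf]; simp
        rw [hspF, hgfF]
        rw [show (if (-1 : Int) ≠ -1 then (-1 : Int) else ((s.length : Nat) : Int)) =
              ((s.length : Nat) : Int) by simp]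
        rw [show (if ((-1 : Int) ≠ -1 ∧ (-1 : Int) < ((s.length : Nat) : Int)) then (-1 : Int)
              else ((s.length : Nat) : Int)) = ((s.length : Nat) : Int) by simp]
        have hchunk : PySem.Chars.slice s (some ((i.toNat + jn + 2 : Nat) : Int))
            (some ((s.length : Nat) : Int)) = s.drop (i.toNat + jn + 2) := by
          rw [PySem.Chars.slice_eq_listSlice, PySem.List.slice_natCast]
          exact List.take_of_length_le (by simp)
        rw [hchunk]
        rw [ih ((s.length : Nat) : Int) _ (by positivity) (by omega) (by omega)
            (by simpa using hMdrop s.length (by omega))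
            (by simpa using hMAdrop s.length (by omega))]
        rw [Int.toNat_natCast, List.drop_length, pvJoinAEmpty, List.append_nil]
        rw [pvJoinOutApp, headSlice]
        rw [pvJoinAStep _ jn hfind hM hMA, hv]
        rw [pvJoinTNeg _ hgf (hMdrop _ (by omega))]
        have hnospace : ' ' ∉ s.drop (i.toNat + jn + 2) := by
          intro hmem
          exact (PySem.Chars.find_eq_neg_one_iff _ [' ']).mp hsp
            ((pvSingletonInfixIff ' ' _).mpr hmem)
        rw [pvItemNoSpace _ hnospace]
        simp [List.append_assoc]
      · -- (b1) no space, next '&#' at g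
        have hpg := (pvFindSpecNat (s.drop (i.toNat + jn + 2)) ['&','#'] g hgf).1
        have hglen : g + 2 ≤ (s.drop (i.toNat + jn + 2)).length := pvPrefixLen2 _ g hpg
        have hvlen : (s.drop (i.toNat + jn + 2)).length = s.length - (i.toNat + jn + 2) := by simp
        have hspF : PySem.Chars.findFrom s [' '] ((i.toNat + jn + 2 : Nat) : Int) none = -1 := by
          rw [hSPF, hsp]; simp
        have hgfF : PySem.Chars.findFrom s ['&','#'] ((i.toNat + jn + 2 : Nat) : Int) none =
            ((i.toNat + jn + 2 + g : Nat) : Int) := by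
          rw [hAPF, hgf, if_neg (by omega)]
          push_cast; ring
        rw [hspF, hgfF]
        rw [show (if (-1 : Int) ≠ -1 then (-1 : Int) else ((s.length : Nat) : Int)) =
              ((s.length : Nat) : Int) by simp]
        rw [if_pos (⟨by omega, by exact_mod_cast (by omega : i.toNat + jn + 2 + g < s.length)⟩ :
              ((i.toNat + jn + 2 + g : Nat) : Int) ≠ -1 ∧
              ((i.toNat + jn + 2 + g : Nat) : Int) < ((s.length : Nat) : Int))]
        have hchunk : PySem.Chars.slice s (some ((i.toNat + jn + 2 : Nat) : Int))
            (some ((i.toNat + jn + 2 + g : Nat) : Int)) =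
            (s.drop (i.toNat + jn + 2)).take g := by
          rw [PySem.Chars.slice_eq_listSlice, PySem.List.slice_natCast,
              show i.toNat + jn + 2 + g - (i.toNat + jn + 2) = g by omega]
        rw [hchunk]
        rw [ih ((i.toNat + jn + 2 + g : Nat) : Int) _ (by positivity) (by omega) (by omega)
            (by rw [show (((i.toNat + jn + 2 + g : Nat) : Int)).toNat = i.toNat + jn + 2 + g from Int.toNat_natCast _]; exact hMdrop _ (by omega))
            (by rw [show (((i.toNat + jn + 2 + g : Nat) : Int)).toNat = i.toNat + jn + 2 + g from Int.toNat_natCast _]; exact hMAdrop _ (by omega))]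
        rw [Int.toNat_natCast]
        rw [pvJoinOutApp, headSlice]
        rw [pvJoinAStep _ jn hfind hM hMA, hv]
        rw [pvJoinTPos _ g hgf (hMdrop _ (by omega)) (hMAdrop _ (by omega))]
        have hdsg : s.drop (i.toNat + jn + 2 + g) = (s.drop (i.toNat + jn + 2)).drop g := by
          rw [List.drop_drop, show i.toNat + jn + 2 + g = i.toNat + jn + 2 + g from rfl]
        have hdec2 : (s.drop (i.toNat + jn + 2)).drop g =
            ['&','#'] ++ (s.drop (i.toNat + jn + 2)).drop (g + 2) := pvDropDecomp _ g hpg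
        rw [hdsg, hdec2]
        rw [pvJoinAAmp _ (by rw [← hdec2, ← hdsg]; exact hMdrop _ (by omega))
            (by rw [← hdec2, ← hdsg]; exact hMAdrop _ (by omega))]
        have hnospace : ' ' ∉ (s.drop (i.toNat + jn + 2)).take g := by
          intro hmem
          apply (PySem.Chars.find_eq_neg_one_iff _ [' ']).mp hsp
          exact (pvSingletonInfixIff ' ' _).mpr (List.mem_of_mem_take hmem)
        rw [pvItemNoSpace _ hnospace]
        simp [List.append_assoc]
      · -- (c1) space at p, no further '&#'
        have hplen : p < (s.drop (i.toNat + jn + 2)).length := by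
          have := pvFindAtGet _ ' ' p hsp
          by_contra hc
          rw [List.getElem?_eq_none_iff.mpr (by omega)] at this
          simp at this
        have hvlen : (s.drop (i.toNat + jn + 2)).length = s.length - (i.toNat + jn + 2) := by simp
        have hspF : PySem.Chars.findFrom s [' '] ((i.toNat + jn + 2 : Nat) : Int) none =
            ((i.toNat + jn + 2 + p : Nat) : Int) := by
          rw [hSPF, hsp, if_neg (by omega)]
          push_cast; ring
        have hgfF : PySem.Chars.findFrom s ['&','#'] ((i.toNat + jn + 2 : Nat) : Int) none = -1 := by
          rw [hAPF, hgf]; simp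
        rw [hspF, hgfF]
        rw [show (if ((i.toNat + jn + 2 + p : Nat) : Int) ≠ -1 then ((i.toNat + jn + 2 + p : Nat) : Int)
              else ((s.length : Nat) : Int)) = ((i.toNat + jn + 2 + p : Nat) : Int) by
            rw [if_pos (by omega)]]
        rw [show (if ((-1 : Int) ≠ -1 ∧ (-1 : Int) < ((i.toNat + jn + 2 + p : Nat) : Int))
              then (-1 : Int) else ((i.toNat + jn + 2 + p : Nat) : Int)) =
              ((i.toNat + jn + 2 + p : Nat) : Int) by simp]
        have hchunk : PySem.Chars.slice s (some ((i.toNat + jn + 2 : Nat) : Int))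
            (some ((i.toNat + jn + 2 + p : Nat) : Int)) =
            (s.drop (i.toNat + jn + 2)).take p := by
          rw [PySem.Chars.slice_eq_listSlice, PySem.List.slice_natCast,
              show i.toNat + jn + 2 + p - (i.toNat + jn + 2) = p by omega]
        rw [hchunk]
        rw [ih ((i.toNat + jn + 2 + p : Nat) : Int) _ (by positivity) (by omega) (by omega)
            (by rw [show (((i.toNat + jn + 2 + p : Nat) : Int)).toNat = i.toNat + jn + 2 + p from Int.toNat_natCast _]; exact hMdrop _ (by omega))
            (by rw [show (((i.toNat + jn + 2 + p : Nat) : Int)).toNat = i.toNat + jn + 2 + p from Int.toNat_natCast _]; exact hMAdrop _ (by omega))]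
        rw [Int.toNat_natCast]
        rw [pvJoinOutApp, headSlice]
        rw [pvJoinAStep _ jn hfind hM hMA, hv]
        rw [pvJoinTNeg _ hgf (hMdrop _ (by omega))]
        have hdsp : s.drop (i.toNat + jn + 2 + p) = (s.drop (i.toNat + jn + 2)).drop p := by
          rw [List.drop_drop]
        rw [hdsp]
        rw [pvJoinANoAmp _ (pvFindDropNeg _ ['&','#'] p hgf)
            (by rw [← hdsp]; exact hMdrop _ (by omega))]
        rw [pvItemSpace _ p hsp]
        simp [List.append_assoc]
      · -- (bc) space at p and '&#' at g
        have hne : g ≠ p := pvAmpHeadNe _ g p hgf hsp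
        have hpg := (pvFindSpecNat (s.drop (i.toNat + jn + 2)) ['&','#'] g hgf).1
        have hglen : g + 2 ≤ (s.drop (i.toNat + jn + 2)).length := pvPrefixLen2 _ g hpg
        have hplen : p < (s.drop (i.toNat + jn + 2)).length := by
          have := pvFindAtGet _ ' ' p hsp
          by_contra hc
          rw [List.getElem?_eq_none_iff.mpr (by omega)] at this
          simp at this
        have hvlen : (s.drop (i.toNat + jn + 2)).length = s.length - (i.toNat + jn + 2) := by simp
        have hspF : PySem.Chars.findFrom s [' '] ((i.toNat + jn + 2 : Nat) : Int) none =
            ((i.toNat + jn + 2 + p : Nat) : Int) := by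
          rw [hSPF, hsp, if_neg (by omega)]
          push_cast; ring
        have hgfF : PySem.Chars.findFrom s ['&','#'] ((i.toNat + jn + 2 : Nat) : Int) none =
            ((i.toNat + jn + 2 + g : Nat) : Int) := by
          rw [hAPF, hgf, if_neg (by omega)]
          push_cast; ring
        rw [hspF, hgfF]
        rw [show (if ((i.toNat + jn + 2 + p : Nat) : Int) ≠ -1 then ((i.toNat + jn + 2 + p : Nat) : Int)
              else ((s.length : Nat) : Int)) = ((i.toNat + jn + 2 + p : Nat) : Int) by
            rw [if_pos (by omega)]]
        by_cases hgp : g < p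
        · -- entity chunk ends at the next '&#'
          rw [if_pos (⟨by omega, by exact_mod_cast (by omega : i.toNat + jn + 2 + g < i.toNat + jn + 2 + p)⟩ :
                ((i.toNat + jn + 2 + g : Nat) : Int) ≠ -1 ∧
                ((i.toNat + jn + 2 + g : Nat) : Int) < ((i.toNat + jn + 2 + p : Nat) : Int))]
          have hchunk : PySem.Chars.slice s (some ((i.toNat + jn + 2 : Nat) : Int))
              (some ((i.toNat + jn + 2 + g : Nat) : Int)) =
              (s.drop (i.toNat + jn + 2)).take g := by
            rw [PySem.Chars.slice_eq_listSlice, PySem.List.slice_natCast,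
                show i.toNat + jn + 2 + g - (i.toNat + jn + 2) = g by omega]
          rw [hchunk]
          rw [ih ((i.toNat + jn + 2 + g : Nat) : Int) _ (by positivity) (by omega) (by omega)
              (by rw [show (((i.toNat + jn + 2 + g : Nat) : Int)).toNat = i.toNat + jn + 2 + g from Int.toNat_natCast _]; exact hMdrop _ (by omega))
              (by rw [show (((i.toNat + jn + 2 + g : Nat) : Int)).toNat = i.toNat + jn + 2 + g from Int.toNat_natCast _]; exact hMAdrop _ (by omega))]
          rw [Int.toNat_natCast]
          rw [pvJoinOutApp, headSlice]
          rw [pvJoinAStep _ jn hfind hM hMA, hv]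
          rw [pvJoinTPos _ g hgf (hMdrop _ (by omega)) (hMAdrop _ (by omega))]
          have hdsg : s.drop (i.toNat + jn + 2 + g) = (s.drop (i.toNat + jn + 2)).drop g := by
            rw [List.drop_drop]
          have hdec2 : (s.drop (i.toNat + jn + 2)).drop g =
              ['&','#'] ++ (s.drop (i.toNat + jn + 2)).drop (g + 2) := pvDropDecomp _ g hpg
          rw [hdsg, hdec2]
          rw [pvJoinAAmp _ (by rw [← hdec2, ← hdsg]; exact hMdrop _ (by omega))
              (by rw [← hdec2, ← hdsg]; exact hMAdrop _ (by omega))]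
          have hnospace : ' ' ∉ (s.drop (i.toNat + jn + 2)).take g :=
            pvNotMemTakeFind _ ' ' p g hsp (by omega)
          rw [pvItemNoSpace _ hnospace]
          simp [List.append_assoc]
        · -- space first: chunk ends at the space, p < g
          have hpg' : p < g := by omega
          rw [if_neg (by
            rintro ⟨-, hlt⟩
            have : (i.toNat + jn + 2 + g : Nat) < (i.toNat + jn + 2 + p : Nat) := by exact_mod_cast hlt
            omega)]
          have hchunk : PySem.Chars.slice s (some ((i.toNat + jn + 2 : Nat) : Int))
              (some ((i.toNat + jn + 2 + p : Nat) : Int)) =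
              (s.drop (i.toNat + jn + 2)).take p := by
            rw [PySem.Chars.slice_eq_listSlice, PySem.List.slice_natCast,
                show i.toNat + jn + 2 + p - (i.toNat + jn + 2) = p by omega]
          rw [hchunk]
          rw [ih ((i.toNat + jn + 2 + p : Nat) : Int) _ (by positivity) (by omega) (by omega)
              (by rw [show (((i.toNat + jn + 2 + p : Nat) : Int)).toNat = i.toNat + jn + 2 + p from Int.toNat_natCast _]; exact hMdrop _ (by omega))
              (by rw [show (((i.toNat + jn + 2 + p : Nat) : Int)).toNat = i.toNat + jn + 2 + p from Int.toNat_natCast _]; exact hMAdrop _ (by omega))]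
          rw [Int.toNat_natCast]
          rw [pvJoinOutApp, headSlice]
          rw [pvJoinAStep _ jn hfind hM hMA, hv]
          rw [pvJoinTPos _ g hgf (hMdrop _ (by omega)) (hMAdrop _ (by omega))]
          have hdsp : s.drop (i.toNat + jn + 2 + p) = (s.drop (i.toNat + jn + 2)).drop p := by
            rw [List.drop_drop]
          rw [hdsp]
          rw [pvJoinAStep _ (g - p) (pvFindDropPos _ ['&','#'] p g hgf (by omega))
              (by rw [← hdsp]; exact hMdrop _ (by omega))
              (by rw [← hdsp]; exact hMAdrop _ (by omega))]
          have hmid : ((s.drop (i.toNat + jn + 2)).drop p).drop (g - p + 2) =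
              (s.drop (i.toNat + jn + 2)).drop (g + 2) := by
            rw [List.drop_drop, show p + (g - p + 2) = g + 2 by omega]
          rw [hmid]
          rw [pvItemSpace _ p (pvFindTake _ ' ' p g hsp hpg')]
          rw [List.take_take, Nat.min_eq_left (by omega)]
          rw [List.drop_take]
          simp [List.append_assoc]

lemma pvTop (s : String) (hM : ¬ pvM <:+: s.toList) (hMA : ¬ pvMA <:+: s.toList) :
    complete_entity s = complete_entity_alt s := by
  simp only [complete_entity, complete_entity_alt]
  congr 1
  rw [PySem.List.foldl_append_singleton_eq_map]
  rw [show ("~BREAK~".toList : List Char) = pvM from rfl,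
      show ("~BREAK~&#".toList : List Char) = pvM ++ ['&','#'] from rfl]
  have hB := pvMain s.toList (s.toList.length + 1) 0 []
    (le_refl 0) (by positivity) (by push_cast; omega)
    (by simpa using hM) (by simpa using hMA)
  rw [hB]
  rw [show ((0 : Int)).toNat = 0 from rfl, List.drop_zero]
  rw [show PySem.Chars.join [] ([] : List (List Char)) = [] from PySem.Chars.join_nil []]
  rw [pvJoinA]
  simp

-- ===== VERDICT (by name: the statement is the Claim_ definition above) =====
theorem complete_entity_spec : Claim_unchanged_complete_entity := by
  intro s _ hD
  have hM : ¬ pvM <:+: s.toList := by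
    intro h
    exact hD (Or.inl ((PySem.Str.isIn_iff_infix _ _).mpr (by simpa using h)))
  have hMA : ¬ pvMA <:+: s.toList := by
    intro h
    exact hD (Or.inr ((PySem.Str.isIn_iff_infix _ _).mpr (by simpa using h)))
  exact pvTop s hM hMA

theorem complete_entity_changed : Claim_changed_complete_entity := by
  unfold Claim_changed_complete_entity; decide
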